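-- pv_equiv track=rewrite | github.com/melihoguzk-star/ba-qa-platform | pipeline/ba_docx_parser.py | _collect_all_links
-- ===== SOURCE A (Python) =====
-- from typing import List, Dict, Any, Optional
--
-- def _collect_all_links(elements: List[Dict]) -> Dict[str, List[str]]:
--     """Tüm elementlerden link topla ve kategorize et."""
--     result: Dict[str, List[str]] = {
--         "lottie":      [],
--         "google_docs": [],
--         "figma":       [],
--         "diger":       [],
--     }
--     seen: set = set()
--
--     for el in elements:
--         for url in el.get("links", []):
--             if url in seen:
--                 continue
--             seen.add(url)
--             if "lottiefiles.com" in url: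
--                 result["lottie"].append(url)
--             elif "docs.google.com" in url:
--                 result["google_docs"].append(url)
--             elif "figma.com" in url:
--                 result["figma"].append(url)
--             else:
--                 result["diger"].append(url)
--
--     return result
-- ===== SOURCE B (Python) =====
-- def _collect_all_links(elements):
--     """Two separate passes: dedupe all links in order, then classify each into its bucket."""
--     unique = list(dict.fromkeys(url for el in elements for url in el.get("links", [])))
--
--     def category(url):
--         if "lottiefiles.com" in url:
--             return "lottie"
--         if "docs.google.com" in url:
--             return "google_docs"
--         if "figma.com" in url:
--             return "figma"
--         return "diger"
--
--     return {k: [u for u in unique if category(u) == k]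
--             for k in ("lottie", "google_docs", "figma", "diger")}
-- ===== Notes on version B (the rewrite author's own statement) =====
-- stated objective: simpler
-- what changed: Replaces the fused loop (inline seen-set plus per-URL branch appending into a mutable result) by two separate passes: an order-preserving dedup of all links via dict.fromkeys, then a per-bucket classification comprehension over that unique list.
import Mathlib
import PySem

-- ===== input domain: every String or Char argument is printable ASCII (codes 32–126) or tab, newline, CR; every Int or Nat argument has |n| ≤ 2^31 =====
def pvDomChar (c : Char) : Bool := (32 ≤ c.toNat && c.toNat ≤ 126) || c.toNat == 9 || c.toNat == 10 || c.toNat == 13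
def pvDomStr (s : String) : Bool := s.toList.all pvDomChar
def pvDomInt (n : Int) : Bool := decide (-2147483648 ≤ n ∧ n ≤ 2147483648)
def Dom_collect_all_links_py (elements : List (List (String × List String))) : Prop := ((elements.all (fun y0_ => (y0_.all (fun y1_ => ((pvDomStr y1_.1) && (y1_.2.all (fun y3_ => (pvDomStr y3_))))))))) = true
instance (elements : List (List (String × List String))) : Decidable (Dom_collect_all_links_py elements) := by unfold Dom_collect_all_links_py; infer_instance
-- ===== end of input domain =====

-- B replaces A's fused dedupe-and-classify loop by two separate passes (ordered dedup, then
-- per-bucket classification); objective: simpler decomposition, same observable result.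

-- ===== PORT A =====
-- one step of A's inner loop: skip seen URLs, else record and append into the matching bucket
def pvAClassify (st : PySem.Dict String (List String) × PySem.Set String) (url : String) :
    PySem.Dict String (List String) × PySem.Set String :=
  if PySem.Set.contains st.2 url then st
  else
    let seen := PySem.Set.add st.2 url
    let res :=
      if PySem.Str.isIn "lottiefiles.com" url then st.1.modify "lottie" [] (· ++ [url])
      else if PySem.Str.isIn "docs.google.com" url then st.1.modify "google_docs" [] (· ++ [url])
      else if PySem.Str.isIn "figma.com" url then st.1.modify "figma" [] (· ++ [url])
      else st.1.modify "diger" [] (· ++ [url])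
    (res, seen)

def collect_all_links_py (elements : List (List (String × List String))) : List (String × List String) :=
  (elements.foldl
      (fun st el => ((PySem.Dict.mk el).getD "links" []).foldl pvAClassify st)
      (PySem.Dict.ofList [("lottie", []), ("google_docs", []), ("figma", []), ("diger", [])],
       PySem.Set.empty)).1.items

-- ===== PORT B =====
def pvCategory (url : String) : String :=
  if PySem.Str.isIn "lottiefiles.com" url then "lottie"
  else if PySem.Str.isIn "docs.google.com" url then "google_docs"
  else if PySem.Str.isIn "figma.com" url then "figma"
  else "diger"

def collect_all_links_py_alt (elements : List (List (String × List String))) : List (String × List String) :=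
  let unique := PySem.List.dedup (elements.flatMap (fun el => (PySem.Dict.mk el).getD "links" []))
  ["lottie", "google_docs", "figma", "diger"].map
    (fun k => (k, unique.filter (fun u => pvCategory u == k)))

-- ===== PRECONDITION & SPEC =====
def Spec_collect_all_links_py (elements : List (List (String × List String))) (out : List (String × List String)) : Prop := out = collect_all_links_py_alt elements
instance (elements : List (List (String × List String))) (out : List (String × List String)) : Decidable (Spec_collect_all_links_py elements out) := by unfold Spec_collect_all_links_py; infer_instance

-- ===== CLAIM (what is proved, stated in full; the proofs are below) =====
def Claim_equal_collect_all_links_py : Prop := ∀ (elements : List (List (String × List String))), Dom_collect_all_links_py elements → Spec_collect_all_links_py elements (collect_all_links_py elements)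


-- ===== LEMMAS AND PROOFS =====

-- the new (not-yet-seen) URLs of a list, in first-occurrence order, mirroring A's seen set
def pvFresh (s : PySem.Set String) : List String → List String
  | [] => []
  | u :: rest => if PySem.Set.contains s u then pvFresh s rest
                 else u :: pvFresh (PySem.Set.add s u) rest

lemma pvModify_lottie (L G F D : List String) (u : String) :
    ((PySem.Dict.mk [("lottie", L), ("google_docs", G), ("figma", F), ("diger", D)]).modify
        "lottie" [] (· ++ [u]))
      = PySem.Dict.mk [("lottie", L ++ [u]), ("google_docs", G), ("figma", F), ("diger", D)] := by
  apply PySem.Dict.ext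
  simp [PySem.Dict.modify, PySem.Dict.items_insert, PySem.Dict.contains_mk, PySem.Dict.getD,
    PySem.Dict.get?_mk_cons]

lemma pvModify_google (L G F D : List String) (u : String) :
    ((PySem.Dict.mk [("lottie", L), ("google_docs", G), ("figma", F), ("diger", D)]).modify
        "google_docs" [] (· ++ [u]))
      = PySem.Dict.mk [("lottie", L), ("google_docs", G ++ [u]), ("figma", F), ("diger", D)] := by
  apply PySem.Dict.ext
  simp [PySem.Dict.modify, PySem.Dict.items_insert, PySem.Dict.contains_mk, PySem.Dict.getD,
    PySem.Dict.get?_mk_cons]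

lemma pvModify_figma (L G F D : List String) (u : String) :
    ((PySem.Dict.mk [("lottie", L), ("google_docs", G), ("figma", F), ("diger", D)]).modify
        "figma" [] (· ++ [u]))
      = PySem.Dict.mk [("lottie", L), ("google_docs", G), ("figma", F ++ [u]), ("diger", D)] := by
  apply PySem.Dict.ext
  simp [PySem.Dict.modify, PySem.Dict.items_insert, PySem.Dict.contains_mk, PySem.Dict.getD,
    PySem.Dict.get?_mk_cons]

lemma pvModify_diger (L G F D : List String) (u : String) :
    ((PySem.Dict.mk [("lottie", L), ("google_docs", G), ("figma", F), ("diger", D)]).modify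
        "diger" [] (· ++ [u]))
      = PySem.Dict.mk [("lottie", L), ("google_docs", G), ("figma", F), ("diger", D ++ [u])] := by
  apply PySem.Dict.ext
  simp [PySem.Dict.modify, PySem.Dict.items_insert, PySem.Dict.contains_mk, PySem.Dict.getD,
    PySem.Dict.get?_mk_cons]

-- A's fused loop, from any state, equals the classification of the fresh URLs appended bucket-wise
lemma pvMain (urls : List String) : ∀ (s : PySem.Set String) (L G F D : List String),
    urls.foldl pvAClassify
        (PySem.Dict.mk [("lottie", L), ("google_docs", G), ("figma", F), ("diger", D)], s)
      = (PySem.Dict.mk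
          [("lottie", L ++ (pvFresh s urls).filter (fun u => pvCategory u == "lottie")),
           ("google_docs", G ++ (pvFresh s urls).filter (fun u => pvCategory u == "google_docs")),
           ("figma", F ++ (pvFresh s urls).filter (fun u => pvCategory u == "figma")),
           ("diger", D ++ (pvFresh s urls).filter (fun u => pvCategory u == "diger"))],
         PySem.Set.update s urls) := by
  induction urls with
  | nil => intro s L G F D; simp [pvFresh, PySem.Set.update]
  | cons u rest ih =>
    intro s L G F D
    by_cases hm : u ∈ s
    · have hc : PySem.Set.contains s u = true := by simp [PySem.Set.contains, hm]
      have hstep : pvAClassify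
          (PySem.Dict.mk [("lottie", L), ("google_docs", G), ("figma", F), ("diger", D)], s) u
          = (PySem.Dict.mk [("lottie", L), ("google_docs", G), ("figma", F), ("diger", D)], s) := by
        simp only [pvAClassify, hc, if_true]
      have hadd : PySem.Set.add s u = s := by simp only [PySem.Set.add, hc, if_true]
      have hfresh : pvFresh s (u :: rest) = pvFresh s rest := by
        simp only [pvFresh, hc, if_true]
      rw [List.foldl_cons, hstep, ih, hfresh]
      simp [PySem.Set.update, hadd]
    · have hc : PySem.Set.contains s u = false := by simp [PySem.Set.contains, hm]
      by_cases h1 : PySem.Str.isIn "lottiefiles.com" u = true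
      · have hcat : pvCategory u = "lottie" := by
          simp only [pvCategory, h1, if_true]
        have hstep : pvAClassify
          (PySem.Dict.mk [("lottie", L), ("google_docs", G), ("figma", F), ("diger", D)], s) u
          = (PySem.Dict.mk [("lottie", L ++ [u]), ("google_docs", G), ("figma", F), ("diger", D)],
          PySem.Set.add s u) := by
          simp only [pvAClassify, hc, Bool.false_eq_true, if_false, h1, if_true]
          rw [pvModify_lottie]
        have hfresh : pvFresh s (u :: rest) = u :: pvFresh (PySem.Set.add s u) rest := by
          simp only [pvFresh, hc, Bool.false_eq_true, if_false]
        rw [List.foldl_cons, hstep, ih, hfresh]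
        simp [hcat, PySem.Set.update]
      · have h1' : PySem.Str.isIn "lottiefiles.com" u = false := by simpa using h1
        by_cases h2 : PySem.Str.isIn "docs.google.com" u = true
        · have hcat : pvCategory u = "google_docs" := by
            simp only [pvCategory, h1', h2, Bool.false_eq_true, if_false, if_true]
          have hstep : pvAClassify
            (PySem.Dict.mk [("lottie", L), ("google_docs", G), ("figma", F), ("diger", D)], s) u
            = (PySem.Dict.mk [("lottie", L), ("google_docs", G ++ [u]), ("figma", F), ("diger", D)],
            PySem.Set.add s u) := by
            simp only [pvAClassify, hc, Bool.false_eq_true, if_false, h1', h2, if_true]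
            rw [pvModify_google]
          have hfresh : pvFresh s (u :: rest) = u :: pvFresh (PySem.Set.add s u) rest := by
            simp only [pvFresh, hc, Bool.false_eq_true, if_false]
          rw [List.foldl_cons, hstep, ih, hfresh]
          simp [hcat, PySem.Set.update]
        · have h2' : PySem.Str.isIn "docs.google.com" u = false := by simpa using h2
          by_cases h3 : PySem.Str.isIn "figma.com" u = true
          · have hcat : pvCategory u = "figma" := by
              simp only [pvCategory, h1', h2', h3, Bool.false_eq_true, if_false, if_true]
            have hstep : pvAClassify
              (PySem.Dict.mk [("lottie", L), ("google_docs", G), ("figma", F), ("diger", D)], s) u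
              = (PySem.Dict.mk [("lottie", L), ("google_docs", G), ("figma", F ++ [u]), ("diger", D)],
              PySem.Set.add s u) := by
              simp only [pvAClassify, hc, Bool.false_eq_true, if_false, h1', h2', h3, if_true]
              rw [pvModify_figma]
            have hfresh : pvFresh s (u :: rest) = u :: pvFresh (PySem.Set.add s u) rest := by
              simp only [pvFresh, hc, Bool.false_eq_true, if_false]
            rw [List.foldl_cons, hstep, ih, hfresh]
            simp [hcat, PySem.Set.update]
          · have h3' : PySem.Str.isIn "figma.com" u = false := by simpa using h3
            have hcat : pvCategory u = "diger" := by
              simp only [pvCategory, h1', h2', h3', Bool.false_eq_true, if_false]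
            have hstep : pvAClassify
              (PySem.Dict.mk [("lottie", L), ("google_docs", G), ("figma", F), ("diger", D)], s) u
              = (PySem.Dict.mk [("lottie", L), ("google_docs", G), ("figma", F), ("diger", D ++ [u])],
              PySem.Set.add s u) := by
              simp only [pvAClassify, hc, Bool.false_eq_true, if_false, h1', h2', h3']
              rw [pvModify_diger]
            have hfresh : pvFresh s (u :: rest) = u :: pvFresh (PySem.Set.add s u) rest := by
              simp only [pvFresh, hc, Bool.false_eq_true, if_false]
            rw [List.foldl_cons, hstep, ih, hfresh]
            simp [hcat, PySem.Set.update]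

-- the seen set grows exactly by the fresh URLs, in order
lemma pvFresh_update (urls : List String) : ∀ (s : PySem.Set String),
    PySem.Set.update s urls = s ++ pvFresh s urls := by
  induction urls with
  | nil => intro s; simp [pvFresh, PySem.Set.update]
  | cons u rest ih =>
    intro s
    by_cases hm : u ∈ s
    · have hadd : PySem.Set.add s u = s := by simp [PySem.Set.add, PySem.Set.contains, hm]
      have hfresh : pvFresh s (u :: rest) = pvFresh s rest := by
        simp [pvFresh, PySem.Set.contains, hm]
      calc PySem.Set.update s (u :: rest) = PySem.Set.update (PySem.Set.add s u) rest := rfl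
        _ = s ++ pvFresh s rest := by rw [hadd]; exact ih s
        _ = s ++ pvFresh s (u :: rest) := by rw [hfresh]
    · have hadd : PySem.Set.add s u = s ++ [u] := by simp [PySem.Set.add, PySem.Set.contains, hm]
      have hfresh : pvFresh s (u :: rest) = u :: pvFresh (PySem.Set.add s u) rest := by
        simp [pvFresh, PySem.Set.contains, hm]
      calc PySem.Set.update s (u :: rest) = PySem.Set.update (PySem.Set.add s u) rest := rfl
        _ = PySem.Set.add s u ++ pvFresh (PySem.Set.add s u) rest := ih _
        _ = s ++ pvFresh s (u :: rest) := by rw [hfresh, hadd]; simp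

lemma pvFresh_empty (urls : List String) :
    pvFresh PySem.Set.empty urls = PySem.List.dedup urls := by
  have h1 : PySem.Set.update PySem.Set.empty urls = PySem.List.dedup urls := by simp [pysem]
  have h2 := pvFresh_update urls PySem.Set.empty
  rw [h1] at h2
  simpa [PySem.Set.empty] using h2.symm

-- ===== VERDICT (by name: the statement is the Claim_ definition above) =====
theorem collect_all_links_py_spec : Claim_equal_collect_all_links_py := by
  intro elements _
  unfold Spec_collect_all_links_py collect_all_links_py collect_all_links_py_alt
  have hinit : PySem.Dict.ofList
      [("lottie", ([] : List String)), ("google_docs", []), ("figma", []), ("diger", [])]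
      = PySem.Dict.mk [("lottie", []), ("google_docs", []), ("figma", []), ("diger", [])] := by
    decide
  rw [hinit, ← List.foldl_flatMap, pvMain, ← pvFresh_empty]
  simp
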